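-- pv_equiv track=rewrite | github.com/catid/evolve | src/psmn_rl/analysis/lss_multi_expert_hardening.py | _common_lane_seed_keys
-- ===== SOURCE A (Python) =====
-- from typing import Any
--
-- def _common_lane_seed_keys(
--     grouped: dict[tuple[str, int, str], list[dict[str, Any]]],
--     labels: list[str],
-- ) -> list[tuple[str, int]]:
--     keys = {(lane, seed) for lane, seed, _label in grouped}
--     return sorted(
--         [
--             (lane, seed)
--             for lane, seed in keys
--             if all((lane, seed, label) in grouped for label in labels)
--         ]
--     )
-- ===== SOURCE B (Python) =====
-- def _common_lane_seed_keys(grouped, labels):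
--     # Group once: for each label, the set of (lane, seed) pairs seen with it.
--     by_label = {}
--     for lane, seed, label in grouped:
--         by_label.setdefault(label, set()).add((lane, seed))
--     # Intersect, label by label, starting from all pairs (intersection over zero labels).
--     result = {(lane, seed) for lane, seed, _label in grouped}
--     for label in set(labels):
--         result &= by_label.get(label, set())
--     return sorted(result)
-- ===== Notes on version B (the rewrite author's own statement) =====
-- stated objective: alternative
-- what changed: B groups the dict keys once into a map label -> set of (lane, seed) pairs and then folds set intersection over the distinct labels starting from the set of all pairs, whereas A filters each candidate pair by testing membership of (lane, seed, label) in the dict for every label.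
import Mathlib
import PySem

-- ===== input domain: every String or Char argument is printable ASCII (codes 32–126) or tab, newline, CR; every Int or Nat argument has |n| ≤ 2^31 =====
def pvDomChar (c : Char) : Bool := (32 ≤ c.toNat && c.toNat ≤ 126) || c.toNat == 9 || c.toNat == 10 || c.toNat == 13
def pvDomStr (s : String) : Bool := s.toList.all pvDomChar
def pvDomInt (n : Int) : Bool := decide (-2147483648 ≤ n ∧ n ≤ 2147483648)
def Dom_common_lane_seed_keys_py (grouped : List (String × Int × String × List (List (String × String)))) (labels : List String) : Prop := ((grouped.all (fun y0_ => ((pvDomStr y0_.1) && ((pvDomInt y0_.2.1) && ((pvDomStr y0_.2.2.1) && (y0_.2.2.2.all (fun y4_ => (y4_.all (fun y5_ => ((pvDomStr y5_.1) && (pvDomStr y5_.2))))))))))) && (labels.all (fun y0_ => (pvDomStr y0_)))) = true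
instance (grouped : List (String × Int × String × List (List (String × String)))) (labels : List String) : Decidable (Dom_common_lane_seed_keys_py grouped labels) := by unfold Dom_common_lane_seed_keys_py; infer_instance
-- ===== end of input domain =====

-- ===== PORT A =====
-- B replaces A's per-candidate all-labels membership test by a fold of set intersections of per-label pair-sets (objective: alternative).
-- A, literally: keys = {(lane, seed) for lane, seed, _label in grouped}; then the comprehension keeps the pairs with
-- all((lane, seed, label) in grouped for label in labels); sorted() of distinct pairs.
def common_lane_seed_keys_py (grouped : List (String × Int × String × List (List (String × String)))) (labels : List String) : List (String × Int) :=
  let keys : PySem.Set (String × Int) := PySem.Set.ofList (grouped.map (fun e => (e.1, e.2.1)))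
  PySem.List.sorted2
    (keys.filter (fun p =>
      labels.all (fun label =>
        grouped.any (fun e => e.1 == p.1 && e.2.1 == p.2 && e.2.2.1 == label))))
    (fun p => p.1) (fun p => p.2) false

-- ===== PORT B =====
-- B: one grouping pass builds by_label[label] = set of (lane, seed) pairs seen with that label
-- (setdefault+add = Dict.modify); result starts as the set of all pairs and is intersected with
-- by_label.get(label, set()) for each distinct label; sorted() of the final set.
def common_lane_seed_keys_py_alt (grouped : List (String × Int × String × List (List (String × String)))) (labels : List String) : List (String × Int) :=
  let byLabel : PySem.Dict String (PySem.Set (String × Int)) :=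
    grouped.foldl
      (fun d e => d.modify e.2.2.1 PySem.Set.empty (fun s => s.add (e.1, e.2.1)))
      PySem.Dict.empty
  let init : PySem.Set (String × Int) := PySem.Set.ofList (grouped.map (fun e => (e.1, e.2.1)))
  let result : PySem.Set (String × Int) :=
    (PySem.Set.ofList labels).foldl
      (fun r label => PySem.Set.inter r (byLabel.getD label PySem.Set.empty))
      init
  PySem.List.sorted2 result (fun p => p.1) (fun p => p.2) false

-- ===== PRECONDITION & SPEC =====
def Spec_common_lane_seed_keys_py (grouped : List (String × Int × String × List (List (String × String)))) (labels : List String) (out : List (String × Int)) : Prop := out = common_lane_seed_keys_py_alt grouped labels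
instance (grouped : List (String × Int × String × List (List (String × String)))) (labels : List String) (out : List (String × Int)) : Decidable (Spec_common_lane_seed_keys_py grouped labels out) := by unfold Spec_common_lane_seed_keys_py; infer_instance

-- ===== CLAIM (what is proved, stated in full; the proofs are below) =====
def Claim_equal_common_lane_seed_keys_py : Prop := ∀ (grouped : List (String × Int × String × List (List (String × String)))) (labels : List String), Dom_common_lane_seed_keys_py grouped labels → Spec_common_lane_seed_keys_py grouped labels (common_lane_seed_keys_py grouped labels)

-- ===== LEMMAS AND PROOFS =====

-- Set.inter keeps the left operand's order: it is filter by membership in the right operand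
lemma pv_inter_eq_filter {α : Type} [BEq α] (s t : PySem.Set α) :
    PySem.Set.inter s t = s.filter (fun x => PySem.Set.contains t x) := rfl

-- a fold of intersections is one filter by the conjunction of the membership tests
lemma pv_foldl_inter {α β : Type} [BEq α] (L : List β) (S : β → PySem.Set α) :
    ∀ (r : PySem.Set α),
      L.foldl (fun r l => PySem.Set.inter r (S l)) r =
        r.filter (fun x => L.all (fun l => PySem.Set.contains (S l) x)) := by
  induction L with
  | nil => intro r; simp
  | cons l L ih =>
    intro r
    rw [List.foldl_cons, ih, pv_inter_eq_filter, List.filter_filter]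
    apply List.filter_congr
    intro x _
    simp [Bool.and_comm]

-- B's grouping step, named so the lemmas can speak about it
def pvStep (d : PySem.Dict String (PySem.Set (String × Int))) (e : String × Int × String × List (List (String × String))) : PySem.Dict String (PySem.Set (String × Int)) :=
  d.modify e.2.2.1 PySem.Set.empty (fun s => s.add (e.1, e.2.1))

-- membership in the accumulated pair-set of a label = some entry of the prefix carries that label and pair
lemma pv_build_getD_mem (G : List (String × Int × String × List (List (String × String)))) :
    ∀ (d : PySem.Dict String (PySem.Set (String × Int))) (l : String) (p : String × Int),
      p ∈ (G.foldl pvStep d).getD l PySem.Set.empty ↔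
        p ∈ d.getD l PySem.Set.empty ∨ ∃ e ∈ G, e.2.2.1 = l ∧ (e.1, e.2.1) = p := by
  induction G with
  | nil => simp
  | cons e G ih =>
    intro d l p
    rw [List.foldl_cons, ih]
    have h : p ∈ (pvStep d e).getD l PySem.Set.empty ↔
        p ∈ d.getD l PySem.Set.empty ∨ (e.2.2.1 = l ∧ (e.1, e.2.1) = p) := by
      unfold pvStep
      rw [PySem.Dict.getD_modify]
      by_cases hl : l = e.2.2.1
      · simp [hl, PySem.Set.mem_add, eq_comm]
      · simp [hl, Ne.symm hl]
    rw [h]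
    constructor
    · rintro ((hm | he) | ⟨x, hx, hk, hv⟩)
      · exact Or.inl hm
      · exact Or.inr ⟨e, by simp, he.1, he.2⟩
      · exact Or.inr ⟨x, by simp [hx], hk, hv⟩
    · rintro (hm | ⟨x, hx, hk, hv⟩)
      · exact Or.inl (Or.inl hm)
      · rcases List.mem_cons.mp hx with h1 | h1
        · subst h1; exact Or.inl (Or.inr ⟨hk, hv⟩)
        · exact Or.inr ⟨x, h1, hk, hv⟩

-- B's membership test at (label, pair) coincides with A's any-scan of grouped
lemma pv_test_eq (G : List (String × Int × String × List (List (String × String)))) (label : String) (p : String × Int) :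
    PySem.Set.contains ((G.foldl pvStep PySem.Dict.empty).getD label PySem.Set.empty) p =
      G.any (fun e => e.1 == p.1 && e.2.1 == p.2 && e.2.2.1 == label) := by
  rw [Bool.eq_iff_iff, PySem.Set.contains_iff, pv_build_getD_mem]
  simp only [PySem.Dict.getD_empty, List.any_eq_true, Bool.and_eq_true, beq_iff_eq]
  constructor
  · rintro (hm | ⟨e, he, hl, hp⟩)
    · simp [PySem.Set.empty] at hm
    · exact ⟨e, he, ⟨congrArg Prod.fst hp, congrArg Prod.snd hp⟩, hl⟩
  · rintro ⟨e, he, ⟨h1, h2⟩, hl⟩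
    exact Or.inr ⟨e, he, hl, Prod.ext h1 h2⟩

-- all over the distinct labels = all over the label list
lemma pv_all_ofList {α : Type} [DecidableEq α] (L : List α) (f : α → Bool) :
    (PySem.Set.ofList L).all f = L.all f := by
  rw [Bool.eq_iff_iff]
  simp [List.all_eq_true, PySem.Set.mem_ofList]

-- A = B, with no hypotheses
lemma pv_main (G : List (String × Int × String × List (List (String × String)))) (L : List String) :
    common_lane_seed_keys_py G L = common_lane_seed_keys_py_alt G L := by
  unfold common_lane_seed_keys_py common_lane_seed_keys_py_alt
  dsimp only
  have hstep : (G.foldl (fun d e => d.modify e.2.2.1 PySem.Set.empty (fun s => s.add (e.1, e.2.1))) PySem.Dict.empty) = G.foldl pvStep PySem.Dict.empty := rfl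
  rw [hstep,
    pv_foldl_inter (PySem.Set.ofList L) (fun label => (G.foldl pvStep PySem.Dict.empty).getD label PySem.Set.empty)]
  congr 1
  apply List.filter_congr
  intro p _
  rw [pv_all_ofList]
  congr 1
  funext label
  exact (pv_test_eq G label p).symm

-- ===== VERDICT (by name: the statement is the Claim_ definition above) =====
theorem common_lane_seed_keys_py_spec : Claim_equal_common_lane_seed_keys_py := by
  intro G L _
  unfold Spec_common_lane_seed_keys_py
  exact pv_main G L
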